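-- pv_equiv track=rewrite | github.com/Yinjiajun278/TFT_item_cluster | analyse.py | find_duplicate_items
-- ===== SOURCE A (Python) =====
-- from collections import defaultdict
-- from typing import List, Dict, Set, Tuple
--
-- def find_duplicate_items(builds: List[List[str]]) -> Dict[str, int]:
--     item_max_count = defaultdict(int)
--     for build in builds:
--         build_counts = defaultdict(int)
--         for item in build:
--             build_counts[item] += 1
--             item_max_count[item] = max(item_max_count[item], build_counts[item])
--
--     return {item: count for item, count in item_max_count.items() if count > 1}
-- ===== SOURCE B (Python) =====
-- from typing import List, Dict
--
-- def find_duplicate_items(builds: List[List[str]]) -> Dict[str, int]: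
--     flat = [item for build in builds for item in build]
--     result: Dict[str, int] = {}
--     for item in dict.fromkeys(flat):
--         m = max(build.count(item) for build in builds)
--         if m > 1:
--             result[item] = m
--     return result
-- ===== Notes on version B (the rewrite author's own statement) =====
-- stated objective: alternative
-- what changed: Item-major instead of build-major: B flattens all builds, deduplicates items in first-occurrence order, and for each distinct item computes max(build.count(item) for build in builds) with list.count, with no incremental counters or running-max dict at all; it trades A's single fused pass for per-item count scans.
import Mathlib
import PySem

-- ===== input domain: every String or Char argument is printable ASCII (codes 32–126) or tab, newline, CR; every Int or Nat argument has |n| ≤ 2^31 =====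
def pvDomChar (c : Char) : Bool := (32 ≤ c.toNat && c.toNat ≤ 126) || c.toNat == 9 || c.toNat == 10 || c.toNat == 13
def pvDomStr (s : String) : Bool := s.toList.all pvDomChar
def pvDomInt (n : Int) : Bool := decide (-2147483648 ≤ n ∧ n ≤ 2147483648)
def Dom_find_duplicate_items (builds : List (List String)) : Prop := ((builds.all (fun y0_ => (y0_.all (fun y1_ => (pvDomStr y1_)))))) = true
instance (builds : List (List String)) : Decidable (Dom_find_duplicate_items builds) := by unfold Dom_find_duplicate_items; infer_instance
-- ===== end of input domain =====

-- B is item-major instead of build-major: flatten, dedup in first-occurrence order, and count each item per build; same result.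

-- ===== PORT A =====
-- A's fused loop: per item, bump the per-build defaultdict count and update the running max.
-- (defaultdict reads are getD _ 0; `item_max_count[item] = max(item_max_count[item], build_counts[item])`
--  reads then overwrites the same key, so getD-then-insert yields the same items list.)
def find_duplicate_items (builds : List (List String)) : List (String × Int) :=
  let item_max_count : PySem.Dict String Int :=
    builds.foldl (fun m build =>
      (build.foldl (fun (st : PySem.Dict String Int × PySem.Dict String Int) item =>
          let bc := st.1.modify item 0 (· + 1)
          (bc, st.2.insert item (max (st.2.getD item 0) (bc.getD item 0))))
        (PySem.Dict.empty, m)).2)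
      PySem.Dict.empty
  item_max_count.items.filter (fun p => p.2 > 1)

-- ===== PORT B =====
-- flat = nested comprehension; dict.fromkeys = PySem.List.dedup; max(generator) = PySem.List.max?
-- (the `none` arm of max? is unreachable: every deduped item comes from some build, so builds ≠ []).
def find_duplicate_items_alt (builds : List (List String)) : List (String × Int) :=
  let flat : List String := builds.flatMap (fun build => build)
  let result : PySem.Dict String Int :=
    (PySem.List.dedup flat).foldl (fun r item =>
      match PySem.List.max? (builds.map (fun build => (build.count item : Int))) (fun y => y) with
      | some m => if m > 1 then r.insert item m else r
      | none => r) PySem.Dict.empty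
  result.items

-- ===== PRECONDITION & SPEC =====
def Spec_find_duplicate_items (builds : List (List String)) (out : List (String × Int)) : Prop := out = find_duplicate_items_alt builds
instance (builds : List (List String)) (out : List (String × Int)) : Decidable (Spec_find_duplicate_items builds out) := by unfold Spec_find_duplicate_items; infer_instance

-- ===== CLAIM (what is proved, stated in full; the proofs are below) =====
def Claim_equal_find_duplicate_items : Prop := ∀ (builds : List (List String)), Dom_find_duplicate_items builds → Spec_find_duplicate_items builds (find_duplicate_items builds)

-- ===== LEMMAS AND PROOFS =====

-- keys of a single insert, as a set add
theorem pv_keys_insert (d : PySem.Dict String Int) (k : String) (v : Int) :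
    (d.insert k v).keys = PySem.Set.add d.keys k := by
  by_cases h : d.contains k = true
  · rw [PySem.Dict.keys_insert_of_contains d v h, PySem.Set.add]
    have : k ∈ d.keys := (PySem.Dict.contains_iff_mem_keys d k).1 h
    simp [PySem.Set.contains, this]
  · rw [PySem.Dict.keys_insert_of_not_contains d v (by simpa using h), PySem.Set.add]
    have : k ∉ d.keys := fun hm => h ((PySem.Dict.contains_iff_mem_keys d k).2 hm)
    simp [PySem.Set.contains, this]

-- A's inner loop: value at k
theorem pv_innerA_getD (build : List String) (bc m : PySem.Dict String Int) (k : String) :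
    ((build.foldl (fun (st : PySem.Dict String Int × PySem.Dict String Int) item =>
        let bc := st.1.modify item 0 (· + 1)
        (bc, st.2.insert item (max (st.2.getD item 0) (bc.getD item 0))))
      (bc, m)).2).getD k 0 =
      if build.count k = 0 then m.getD k 0
      else max (m.getD k 0) (bc.getD k 0 + (build.count k : Int)) := by
  induction build generalizing bc m with
  | nil => simp
  | cons x rest ih =>
      simp only [List.foldl_cons]
      rw [ih]
      by_cases hk : k = x
      · subst hk
        simp only [List.count_cons_self]
        rw [PySem.Dict.getD_modify_self, PySem.Dict.getD_insert, if_pos rfl]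
        generalize m.getD k 0 = A
        generalize bc.getD k 0 = B
        by_cases h0 : List.count k rest = 0
        · rw [if_pos h0, if_neg (by omega), h0]
          norm_num
        · rw [if_neg h0, if_neg (by omega)]
          push_cast
          rw [max_assoc]
          congr 1
          rw [max_eq_right (by omega)]
          ring
      · have hne : ¬ x = k := fun h => hk h.symm
        rw [List.count_cons_of_ne hne]
        simp [PySem.Dict.getD_modify, PySem.Dict.getD_insert, hk]

-- A's inner loop: keys
theorem pv_innerA_keys (build : List String) (bc m : PySem.Dict String Int) :
    ((build.foldl (fun (st : PySem.Dict String Int × PySem.Dict String Int) item =>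
        let bc := st.1.modify item 0 (· + 1)
        (bc, st.2.insert item (max (st.2.getD item 0) (bc.getD item 0))))
      (bc, m)).2).keys = PySem.Set.update m.keys build := by
  induction build generalizing bc m with
  | nil => rfl
  | cons x rest ih =>
      simp only [List.foldl_cons]
      rw [ih, pv_keys_insert]
      rfl

-- A's outer loop: keys accumulate by Set.update
theorem pv_outerA_keys (builds : List (List String)) (m : PySem.Dict String Int) :
    (builds.foldl (fun m build =>
      (build.foldl (fun (st : PySem.Dict String Int × PySem.Dict String Int) item =>
          let bc := st.1.modify item 0 (· + 1)
          (bc, st.2.insert item (max (st.2.getD item 0) (bc.getD item 0))))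
        (PySem.Dict.empty, m)).2) m).keys
    = PySem.Set.update m.keys (builds.flatMap (fun build => build)) := by
  induction builds generalizing m with
  | nil => rfl
  | cons b bs ih =>
      simp only [List.foldl_cons, List.flatMap_cons]
      rw [ih, pv_innerA_keys, PySem.Set.update_append]

-- A's outer loop: value at k
theorem pv_outerA_getD (builds : List (List String)) (m : PySem.Dict String Int) (k : String) :
    ((builds.foldl (fun m build =>
      (build.foldl (fun (st : PySem.Dict String Int × PySem.Dict String Int) item =>
          let bc := st.1.modify item 0 (· + 1)
          (bc, st.2.insert item (max (st.2.getD item 0) (bc.getD item 0))))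
        (PySem.Dict.empty, m)).2) m).getD k 0)
    = builds.foldl (fun a build => if build.count k = 0 then a else max a (build.count k : Int)) (m.getD k 0) := by
  induction builds generalizing m with
  | nil => rfl
  | cons b bs ih =>
      simp only [List.foldl_cons]
      rw [ih, pv_innerA_getD]
      simp

-- the guarded running max over counts is the plain running max (counts are ≥ 0)
theorem pv_max_step (l : List (List String)) (k : String) (a : Int) (ha : 0 ≤ a) :
    l.foldl (fun a build => if build.count k = 0 then a else max a (build.count k : Int)) a
    = (l.map (fun build => (build.count k : Int))).foldl max a := by
  induction l generalizing a with
  | nil => rfl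
  | cons b bs ih =>
      simp only [List.foldl_cons, List.map_cons]
      by_cases h0 : b.count k = 0
      · rw [if_pos h0, h0, ih a ha]
        norm_num [ha]
      · rw [if_neg h0, ih _ (le_trans ha (le_max_left _ _))]

-- Python's max over the count generator returns exactly A's accumulated value
theorem pv_max_eq (builds : List (List String)) (k : String) (hne : builds ≠ []) :
    PySem.List.max? (builds.map (fun build => (build.count k : Int))) (fun y => y)
    = some (builds.foldl (fun a build => if build.count k = 0 then a else max a (build.count k : Int)) 0) := by
  cases builds with
  | nil => exact absurd rfl hne
  | cons b bs =>
      rw [List.map_cons, PySem.List.max?_id_cons, pv_max_step _ _ _ le_rfl]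
      simp only [List.map_cons, List.foldl_cons]
      rw [max_eq_right (Int.natCast_nonneg _)]

-- B's conditional-insert loop over fresh distinct keys appends the filtered pairs
theorem pv_B_items (v : String → Int) (l : List String) (d : PySem.Dict String Int)
    (hnd : l.Nodup) (hf : ∀ x ∈ l, d.contains x = false) :
    (l.foldl (fun r item => if v item > 1 then r.insert item (v item) else r) d).items
    = d.items ++ (l.filter (fun item => decide (v item > 1))).map (fun item => (item, v item)) := by
  induction l generalizing d with
  | nil => simp
  | cons x xs ih =>
      simp only [List.nodup_cons] at hnd
      simp only [List.foldl_cons, List.filter_cons]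
      by_cases hv : v x > 1
      · rw [if_pos hv, if_pos (by simpa using hv)]
        rw [ih _ hnd.2 (fun y hy => by
          rw [PySem.Dict.contains_insert]
          have : (y == x) = false := by
            simp only [beq_eq_false_iff_ne, ne_eq]
            exact fun h => hnd.1 (h ▸ hy)
          rw [this, hf y (List.mem_cons_of_mem _ hy)]
          rfl)]
        rw [PySem.Dict.items_insert_of_not_contains _ _ (hf x (List.mem_cons_self ..))]
        simp
      · rw [if_neg hv, if_neg (by simpa using hv)]
        exact ih _ hnd.2 (fun y hy => hf y (List.mem_cons_of_mem _ hy))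

-- the running-max value A accumulates for an item, build by build
def pvV (builds : List (List String)) (k : String) : Int :=
  builds.foldl (fun a build => if build.count k = 0 then a else max a (build.count k : Int)) 0

-- ===== VERDICT (by name: the statement is the Claim_ definition above) =====
theorem find_duplicate_items_spec : Claim_equal_find_duplicate_items := by
  intro builds _
  show find_duplicate_items builds = find_duplicate_items_alt builds
  unfold find_duplicate_items find_duplicate_items_alt
  show ((builds.foldl (fun m build =>
      (build.foldl (fun (st : PySem.Dict String Int × PySem.Dict String Int) item =>
          let bc := st.1.modify item 0 (· + 1)
          (bc, st.2.insert item (max (st.2.getD item 0) (bc.getD item 0))))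
        (PySem.Dict.empty, m)).2) PySem.Dict.empty).items.filter (fun p => p.2 > 1))
    = ((PySem.List.dedup (builds.flatMap (fun build => build))).foldl (fun r item =>
        match PySem.List.max? (builds.map (fun build => (build.count item : Int))) (fun y => y) with
        | some m => if m > 1 then r.insert item m else r
        | none => r) PySem.Dict.empty).items
  -- B side: resolve max? on every deduped item, then unroll the conditional-insert loop
  have hB : ((PySem.List.dedup (builds.flatMap (fun build => build))).foldl (fun r item =>
        match PySem.List.max? (builds.map (fun build => (build.count item : Int))) (fun y => y) with
        | some m => if m > 1 then r.insert item m else r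
        | none => r) PySem.Dict.empty)
      = ((PySem.List.dedup (builds.flatMap (fun build => build))).foldl
          (fun (r : PySem.Dict String Int) item =>
            if pvV builds item > 1 then r.insert item (pvV builds item) else r) PySem.Dict.empty) := by
    apply PySem.List.foldl_congr_mem'
    intro x hx acc
    have hne : builds ≠ [] := by
      rw [PySem.List.mem_dedup] at hx
      rcases List.mem_flatMap.1 hx with ⟨b, hb, -⟩
      exact fun h => by simp [h] at hb
    rw [pv_max_eq builds x hne]
    rfl
  rw [hB, pv_B_items (pvV builds) _ _ (PySem.List.nodup_dedup _)
        (fun x _ => PySem.Dict.contains_empty x)]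
  -- A side: items = keys paired with values; keys are the deduped flattening
  have hkeys : (builds.foldl (fun m build =>
      (build.foldl (fun (st : PySem.Dict String Int × PySem.Dict String Int) item =>
          let bc := st.1.modify item 0 (· + 1)
          (bc, st.2.insert item (max (st.2.getD item 0) (bc.getD item 0))))
        (PySem.Dict.empty, m)).2) PySem.Dict.empty).keys
      = PySem.Set.ofList (builds.flatMap (fun build => build)) := by
    rw [pv_outerA_keys, PySem.Dict.keys_empty, PySem.Set.update_nil_left]
  have hval : ∀ k, ((builds.foldl (fun m build =>
      (build.foldl (fun (st : PySem.Dict String Int × PySem.Dict String Int) item =>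
          let bc := st.1.modify item 0 (· + 1)
          (bc, st.2.insert item (max (st.2.getD item 0) (bc.getD item 0))))
        (PySem.Dict.empty, m)).2) PySem.Dict.empty).getD k 0) = pvV builds k := by
    intro k
    rw [pv_outerA_getD, PySem.Dict.getD_empty]
    rfl
  rw [PySem.Dict.items_eq_map_keys _ (by rw [hkeys]; exact PySem.Set.nodup_ofList _) 0, hkeys]
  have hmapeq : (PySem.Set.ofList (builds.flatMap (fun build => build))).map
        (fun k => (k, ((builds.foldl (fun m build =>
          (build.foldl (fun (st : PySem.Dict String Int × PySem.Dict String Int) item =>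
              let bc := st.1.modify item 0 (· + 1)
              (bc, st.2.insert item (max (st.2.getD item 0) (bc.getD item 0))))
            (PySem.Dict.empty, m)).2) PySem.Dict.empty).getD k 0)))
      = (PySem.Set.ofList (builds.flatMap (fun build => build))).map
        (fun k => (k, pvV builds k)) :=
    List.map_congr_left (fun k _ => by rw [hval k])
  rw [hmapeq, List.filter_map]
  rfl
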